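-- pv_equiv track=rewrite | github.com/pypi-data/pypi-mirror-392 | packages/codeius/codeius-1.0.2-py3-none-any.whl/coding_agent/provider/mcp.py | _self_documenting_server
-- ===== SOURCE A (Python) =====
-- def _self_documenting_server(messages):
--     """Handle self-documenting requests for updating documentation"""
--     last_message = messages[-1]["content"] if messages else ""
--
--     # Look for keywords that suggest a documentation update request
--     if any(word in last_message.lower() for word in ["authors", "contributor", "author"]):
--         # This is a simplified implementation. In a real implementation, the agent would send
--         # author update requests to the self-documenting server, but for now we'll just return a message
--         # indicating what would happen.
--         return f"Self-documenting server would update authors based on: {last_message[:100]}..."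
--     elif any(word in last_message.lower() for word in ["changelog", "change", "log"]):
--         return f"Self-documenting server would update changelog based on: {last_message[:100]}..."
--     elif any(word in last_message.lower() for word in ["readme", "read me", "documentation"]):
--         return f"Self-documenting server would update README based on: {last_message[:100]}..."
--     elif any(word in last_message.lower() for word in ["doc", "document", "update"]):
--         return f"Self-documenting server would update documentation based on: {last_message[:100]}..."
--     else:
--         return f"Self-documenting server received: {last_message[:100]}... (authors/changelog/readme)"
-- ===== SOURCE B (Python) =====
-- _KEYWORD_RANK = {
--     "authors": 0, "contributor": 0, "author": 0,
--     "changelog": 1, "change": 1, "log": 1,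
--     "readme": 2, "read me": 2, "documentation": 2,
--     "doc": 3, "document": 3, "update": 3,
-- }
-- _TOPICS = ["authors", "changelog", "README", "documentation"]
--
-- def _self_documenting_server(messages):
--     last_message = messages[-1]["content"] if messages else ""
--     lc = last_message.lower()
--     best = min((r for k, r in _KEYWORD_RANK.items() if k in lc), default=4)
--     if best == 4:
--         return f"Self-documenting server received: {last_message[:100]}... (authors/changelog/readme)"
--     return f"Self-documenting server would update {_TOPICS[best]} based on: {last_message[:100]}..."
-- ===== Notes on version B (the rewrite author's own statement) =====
-- stated objective: alternative
-- what changed: Replaces A's first-match elif chain over keyword groups by a min-priority reduction: one flat keyword-to-rank map, best = min rank of any keyword present in the lowered message (default 4), and the rank indexes a topic table or selects the default sentence.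
import Mathlib
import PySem

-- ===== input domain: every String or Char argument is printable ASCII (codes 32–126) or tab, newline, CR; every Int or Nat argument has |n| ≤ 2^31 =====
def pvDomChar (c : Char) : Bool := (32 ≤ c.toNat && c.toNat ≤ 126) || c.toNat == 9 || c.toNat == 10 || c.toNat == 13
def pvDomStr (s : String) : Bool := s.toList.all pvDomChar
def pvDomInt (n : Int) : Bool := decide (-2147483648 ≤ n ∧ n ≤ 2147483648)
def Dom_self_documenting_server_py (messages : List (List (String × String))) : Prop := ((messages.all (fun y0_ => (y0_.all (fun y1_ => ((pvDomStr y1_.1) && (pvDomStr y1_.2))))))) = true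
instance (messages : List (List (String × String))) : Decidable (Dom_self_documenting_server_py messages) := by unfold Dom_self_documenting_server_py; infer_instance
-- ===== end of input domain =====

-- B replaces A's first-match elif chain by a min-priority reduction over one flat keyword→rank map (objective: alternative).
-- Equivalence is about the return value only; neither program mutates its argument.

-- ===== PORT A =====
-- messages[-1]["content"] if messages else ""  (shared verbatim by A and B; KeyError excluded by Pre_)
def pvLastMessage (messages : List (List (String × String))) : String :=
  match messages.getLast? with
  | none => ""
  | some d => ((PySem.Dict.mk d).get? "content").getD ""
-- A: elif chain; lowercases the message anew in every branch condition, each branch its own f-string.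
def self_documenting_server_py (messages : List (List (String × String))) : String :=
  let last_message : String := pvLastMessage messages
  if ["authors", "contributor", "author"].any (fun w => PySem.Str.isIn w (PySem.Str.lower last_message)) then
    "Self-documenting server would update authors based on: " ++ PySem.Str.slice last_message none (some 100) ++ "..."
  else if ["changelog", "change", "log"].any (fun w => PySem.Str.isIn w (PySem.Str.lower last_message)) then
    "Self-documenting server would update changelog based on: " ++ PySem.Str.slice last_message none (some 100) ++ "..."
  else if ["readme", "read me", "documentation"].any (fun w => PySem.Str.isIn w (PySem.Str.lower last_message)) then
    "Self-documenting server would update README based on: " ++ PySem.Str.slice last_message none (some 100) ++ "..."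
  else if ["doc", "document", "update"].any (fun w => PySem.Str.isIn w (PySem.Str.lower last_message)) then
    "Self-documenting server would update documentation based on: " ++ PySem.Str.slice last_message none (some 100) ++ "..."
  else
    "Self-documenting server received: " ++ PySem.Str.slice last_message none (some 100) ++ "... (authors/changelog/readme)"

-- ===== PORT B =====
-- B: one flat keyword→rank map; a min-reduction over the keywords present picks the best rank,
-- and the rank indexes the topic table (4 = no keyword present → the default sentence).
def pvKeywordRank : List (String × Nat) :=
  [("authors", 0), ("contributor", 0), ("author", 0),
   ("changelog", 1), ("change", 1), ("log", 1),
   ("readme", 2), ("read me", 2), ("documentation", 2),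
   ("doc", 3), ("document", 3), ("update", 3)]

def pvTopics : List String := ["authors", "changelog", "README", "documentation"]

def self_documenting_server_py_alt (messages : List (List (String × String))) : String :=
  let last_message : String := pvLastMessage messages
  let lc := PySem.Str.lower last_message
  -- min((r for k, r in _KEYWORD_RANK.items() if k in lc), default=4)
  let best : Nat := pvKeywordRank.foldl
    (fun acc kr => if PySem.Str.isIn kr.1 lc then min acc kr.2 else acc) 4
  if best == 4 then
    "Self-documenting server received: " ++ PySem.Str.slice last_message none (some 100) ++ "... (authors/changelog/readme)"
  else
    -- _TOPICS[best]: best < 4 here, so the index is always in range and getD is exact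
    "Self-documenting server would update " ++ pvTopics.getD best "" ++ " based on: " ++ PySem.Str.slice last_message none (some 100) ++ "..."

-- ===== PRECONDITION & SPEC =====
-- Pre_ excludes exactly the inputs where Python A (and B alike) raises KeyError:
-- a nonempty message list whose last message has no "content" key.
def Pre_self_documenting_server_py (messages : List (List (String × String))) : Prop :=
  messages = [] ∨ "content" ∈ (messages.getLastD []).map (·.1)
instance (messages : List (List (String × String))) : Decidable (Pre_self_documenting_server_py messages) := by unfold Pre_self_documenting_server_py; infer_instance
def pvWitness_self_documenting_server_py : (List (List (String × String))) := [[("content", "update readme")]]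
def Spec_self_documenting_server_py (messages : List (List (String × String))) (out : String) : Prop := out = self_documenting_server_py_alt messages
instance (messages : List (List (String × String))) (out : String) : Decidable (Spec_self_documenting_server_py messages out) := by unfold Spec_self_documenting_server_py; infer_instance

-- ===== CLAIM (what is proved, stated in full; the proofs are below) =====
def Claim_equal_self_documenting_server_py : Prop := ∀ (messages : List (List (String × String))), Dom_self_documenting_server_py messages → Pre_self_documenting_server_py messages → Spec_self_documenting_server_py messages (self_documenting_server_py messages)

-- ===== LEMMAS AND PROOFS =====

-- The min-fold over the flat keyword/rank pairs, with the membership tests abstracted to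
-- Booleans, equals the first-matching-group rank (4 = none).
theorem pvFoldEq (a1 a2 a3 b1 b2 b3 c1 c2 c3 d1 d2 d3 : Bool) :
    (List.foldl (fun (acc : Nat) (kr : Bool × Nat) => if kr.1 then min acc kr.2 else acc) 4
      [(a1, 0), (a2, 0), (a3, 0), (b1, 1), (b2, 1), (b3, 1),
       (c1, 2), (c2, 2), (c3, 2), (d1, 3), (d2, 3), (d3, 3)])
    = (if a1 || (a2 || a3) then 0 else if b1 || (b2 || b3) then 1
       else if c1 || (c2 || c3) then 2 else if d1 || (d2 || d3) then 3 else 4) := by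
  revert a1 a2 a3 b1 b2 b3 c1 c2 c3 d1 d2 d3; decide

-- The fold over (keyword, rank) pairs equals the same fold over the precomputed membership Booleans.
theorem pvFoldBridge (lc : String) :
    (List.foldl (fun (acc : Nat) (kr : String × Nat) =>
        if PySem.Str.isIn kr.1 lc then min acc kr.2 else acc) 4 pvKeywordRank)
    = (List.foldl (fun (acc : Nat) (kr : Bool × Nat) => if kr.1 then min acc kr.2 else acc) 4
      [(PySem.Str.isIn "authors" lc, 0), (PySem.Str.isIn "contributor" lc, 0), (PySem.Str.isIn "author" lc, 0),
       (PySem.Str.isIn "changelog" lc, 1), (PySem.Str.isIn "change" lc, 1), (PySem.Str.isIn "log" lc, 1),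
       (PySem.Str.isIn "readme" lc, 2), (PySem.Str.isIn "read me" lc, 2), (PySem.Str.isIn "documentation" lc, 2),
       (PySem.Str.isIn "doc" lc, 3), (PySem.Str.isIn "document" lc, 3), (PySem.Str.isIn "update" lc, 3)]) := by
  simp only [pvKeywordRank, List.foldl_cons, List.foldl_nil]

-- ===== VERDICT (by name: the statement is the Claim_ definition above) =====
theorem self_documenting_server_py_spec : Claim_equal_self_documenting_server_py := by
  intro messages _ _
  unfold Spec_self_documenting_server_py self_documenting_server_py self_documenting_server_py_alt
  simp only [pvTopics, List.any_cons, List.any_nil, Bool.or_false, pvFoldBridge, pvFoldEq]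
  generalize PySem.Str.lower (pvLastMessage messages) = lc
  generalize PySem.Str.slice (pvLastMessage messages) none (some 100) = sn
  generalize (PySem.Str.isIn "authors" lc || (PySem.Str.isIn "contributor" lc || PySem.Str.isIn "author" lc)) = g0
  generalize (PySem.Str.isIn "changelog" lc || (PySem.Str.isIn "change" lc || PySem.Str.isIn "log" lc)) = g1
  generalize (PySem.Str.isIn "readme" lc || (PySem.Str.isIn "read me" lc || PySem.Str.isIn "documentation" lc)) = g2
  generalize (PySem.Str.isIn "doc" lc || (PySem.Str.isIn "document" lc || PySem.Str.isIn "update" lc)) = g3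
  cases g0 <;> cases g1 <;> cases g2 <;> cases g3 <;> rfl
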